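-- pv_equiv track=rewrite | github.com/dehemisathsarani/healthy_lifestyle_advisor | backend/app/etl/food_vision_etl_integration.py | _categorize_food_preferences
-- ===== SOURCE A (Python) =====
-- from typing import Dict, List, Optional, Any, Union
--
-- def _categorize_food_preferences(food_frequency: Dict[str, int]) -> Dict[str, int]:
--     """Categorize foods into dietary categories"""
--
--     categories = {
--         'grains': 0,
--         'proteins': 0,
--         'vegetables': 0,
--         'fruits': 0,
--         'dairy': 0,
--         'snacks': 0,
--         'beverages': 0,
--         'other': 0
--     }
--
--     for food_name, frequency in food_frequency.items():
--         if any(grain in food_name for grain in ['rice', 'bread', 'roti', 'noodles', 'pasta']):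
--             categories['grains'] += frequency
--         elif any(protein in food_name for protein in ['chicken', 'fish', 'meat', 'egg', 'dal', 'beans', 'lentils']):
--             categories['proteins'] += frequency
--         elif any(veg in food_name for veg in ['vegetable', 'curry', 'salad', 'greens', 'spinach']):
--             categories['vegetables'] += frequency
--         elif any(fruit in food_name for fruit in ['fruit', 'banana', 'apple', 'mango', 'orange']):
--             categories['fruits'] += frequency
--         elif any(dairy in food_name for dairy in ['milk', 'yogurt', 'cheese', 'curd']):
--             categories['dairy'] += frequency
--         elif any(snack in food_name for snack in ['biscuit', 'cake', 'chips', 'chocolate']):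
--             categories['snacks'] += frequency
--         elif any(bev in food_name for bev in ['tea', 'coffee', 'juice', 'water']):
--             categories['beverages'] += frequency
--         else:
--             categories['other'] += frequency
--
--     return categories
-- ===== SOURCE B (Python) =====
-- _TABLE = [
--     ('grains', ['rice', 'bread', 'roti', 'noodles', 'pasta']),
--     ('proteins', ['chicken', 'fish', 'meat', 'egg', 'dal', 'beans', 'lentils']),
--     ('vegetables', ['vegetable', 'curry', 'salad', 'greens', 'spinach']),
--     ('fruits', ['fruit', 'banana', 'apple', 'mango', 'orange']),
--     ('dairy', ['milk', 'yogurt', 'cheese', 'curd']),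
--     ('snacks', ['biscuit', 'cake', 'chips', 'chocolate']),
--     ('beverages', ['tea', 'coffee', 'juice', 'water']),
-- ]
--
--
-- def _classify(food_name):
--     for category, keywords in _TABLE:
--         if any(keyword in food_name for keyword in keywords):
--             return category
--     return 'other'
--
--
-- def _categorize_food_preferences(food_frequency):
--     """Categorize foods into dietary categories"""
--     names = [category for category, _ in _TABLE] + ['other']
--     classified = [(_classify(name), freq) for name, freq in food_frequency.items()]
--     return {category: sum(freq for cat, freq in classified if cat == category)
--             for category in names}
-- ===== Notes on version B (the rewrite author's own statement) =====
-- stated objective: simpler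
-- what changed: Replaces the eight-branch elif ladder mutating a dict of counters with a first-match classifier over an ordered (category, keywords) table and a per-category sum comprehension.
import Mathlib
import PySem

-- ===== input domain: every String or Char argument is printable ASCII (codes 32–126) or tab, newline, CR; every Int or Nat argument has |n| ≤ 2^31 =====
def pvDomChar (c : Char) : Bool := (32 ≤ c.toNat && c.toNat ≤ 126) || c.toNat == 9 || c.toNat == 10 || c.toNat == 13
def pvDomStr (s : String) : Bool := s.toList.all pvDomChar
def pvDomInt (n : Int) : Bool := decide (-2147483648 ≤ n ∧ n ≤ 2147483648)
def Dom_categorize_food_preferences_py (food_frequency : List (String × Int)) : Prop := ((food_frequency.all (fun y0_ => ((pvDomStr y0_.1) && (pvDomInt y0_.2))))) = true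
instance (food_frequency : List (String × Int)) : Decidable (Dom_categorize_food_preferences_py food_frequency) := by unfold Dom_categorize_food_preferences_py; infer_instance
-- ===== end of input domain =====

-- B replaces A's accumulate-in-a-dict elif ladder with a first-match classifier over a
-- (category, keywords) table plus one per-category sum; objective: simpler.

-- ===== PORT A =====
-- shared keyword-list constants (the same literals both Pythons contain)
def kwGrains : List String := ["rice", "bread", "roti", "noodles", "pasta"]
def kwProteins : List String := ["chicken", "fish", "meat", "egg", "dal", "beans", "lentils"]
def kwVegetables : List String := ["vegetable", "curry", "salad", "greens", "spinach"]
def kwFruits : List String := ["fruit", "banana", "apple", "mango", "orange"]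
def kwDairy : List String := ["milk", "yogurt", "cheese", "curd"]
def kwSnacks : List String := ["biscuit", "cake", "chips", "chocolate"]
def kwBeverages : List String := ["tea", "coffee", "juice", "water"]

-- 'any(kw in food_name for kw in kws)'
def anyKw (kws : List String) (food_name : String) : Bool :=
  kws.any (fun kw => PySem.Str.isIn kw food_name)

-- the elif ladder body of A's loop: 'categories[cat] += frequency' on the matching branch
def stepA (categories : PySem.Dict String Int) (p : String × Int) : PySem.Dict String Int :=
  if anyKw kwGrains p.1 then categories.modify "grains" 0 (· + p.2)
  else if anyKw kwProteins p.1 then categories.modify "proteins" 0 (· + p.2)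
  else if anyKw kwVegetables p.1 then categories.modify "vegetables" 0 (· + p.2)
  else if anyKw kwFruits p.1 then categories.modify "fruits" 0 (· + p.2)
  else if anyKw kwDairy p.1 then categories.modify "dairy" 0 (· + p.2)
  else if anyKw kwSnacks p.1 then categories.modify "snacks" 0 (· + p.2)
  else if anyKw kwBeverages p.1 then categories.modify "beverages" 0 (· + p.2)
  else categories.modify "other" 0 (· + p.2)

def categorize_food_preferences_py (food_frequency : List (String × Int)) : List (String × Int) :=
  (food_frequency.foldl stepA
    (PySem.Dict.mk [("grains", 0), ("proteins", 0), ("vegetables", 0), ("fruits", 0),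
                    ("dairy", 0), ("snacks", 0), ("beverages", 0), ("other", 0)])).items

-- ===== PORT B =====
-- Source B's _TABLE
def catTable : List (String × List String) :=
  [("grains", kwGrains), ("proteins", kwProteins), ("vegetables", kwVegetables),
   ("fruits", kwFruits), ("dairy", kwDairy), ("snacks", kwSnacks), ("beverages", kwBeverages)]

-- Source B's _classify: first table row one of whose keywords is a substring; 'other' if none
def classifyB : List (String × List String) → String → String
  | [], _ => "other"
  | (cat, kws) :: rest, food_name =>
      if anyKw kws food_name then cat else classifyB rest food_name

def categorize_food_preferences_py_alt (food_frequency : List (String × Int)) : List (String × Int) :=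
  let classified := food_frequency.map (fun p => (classifyB catTable p.1, p.2))
  ((catTable.map Prod.fst) ++ ["other"]).map (fun cat =>
    (cat, ((classified.filter (fun p => p.1 == cat)).map Prod.snd).sum))

-- ===== PRECONDITION & SPEC =====
def Spec_categorize_food_preferences_py (food_frequency : List (String × Int)) (out : List (String × Int)) : Prop := out = categorize_food_preferences_py_alt food_frequency
instance (food_frequency : List (String × Int)) (out : List (String × Int)) : Decidable (Spec_categorize_food_preferences_py food_frequency out) := by unfold Spec_categorize_food_preferences_py; infer_instance

-- ===== CLAIM (what is proved, stated in full; the proofs are below) =====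
def Claim_equal_categorize_food_preferences_py : Prop := ∀ (food_frequency : List (String × Int)), Dom_categorize_food_preferences_py food_frequency → Spec_categorize_food_preferences_py food_frequency (categorize_food_preferences_py food_frequency)

-- ===== LEMMAS AND PROOFS =====

-- total frequency B assigns to category `cat`
def catSum (cat : String) (xs : List (String × Int)) : Int :=
  (((xs.map (fun p => (classifyB catTable p.1, p.2))).filter (fun p => p.1 == cat)).map Prod.snd).sum

-- A's dict state always has exactly these eight keys in this order
def dict8 (a b c d e f g h : Int) : PySem.Dict String Int :=
  PySem.Dict.mk [("grains", a), ("proteins", b), ("vegetables", c), ("fruits", d),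
                 ("dairy", e), ("snacks", f), ("beverages", g), ("other", h)]

lemma stepA_eq (categories : PySem.Dict String Int) (p : String × Int) :
    stepA categories p = categories.modify (classifyB catTable p.1) 0 (· + p.2) := by
  simp only [stepA, catTable, classifyB]
  split_ifs <;> rfl

lemma classify_cases (n : String) :
    classifyB catTable n = "grains" ∨ classifyB catTable n = "proteins" ∨
    classifyB catTable n = "vegetables" ∨ classifyB catTable n = "fruits" ∨
    classifyB catTable n = "dairy" ∨ classifyB catTable n = "snacks" ∨
    classifyB catTable n = "beverages" ∨ classifyB catTable n = "other" := by
  simp only [catTable, classifyB]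
  split_ifs <;> simp

lemma catSum_cons (cat : String) (p : String × Int) (xs : List (String × Int)) :
    catSum cat (p :: xs) =
      (if classifyB catTable p.1 == cat then p.2 else 0) + catSum cat xs := by
  simp only [catSum, List.map_cons, List.filter_cons]
  split <;> simp

lemma mod_grains (a b c d e f g h q : Int) :
    (dict8 a b c d e f g h).modify "grains" 0 (· + q) = dict8 (a + q) b c d e f g h := by
  simp [dict8, PySem.Dict.modify, PySem.Dict.insert, PySem.Dict.contains, PySem.Dict.getD, PySem.Dict.get?]

lemma mod_proteins (a b c d e f g h q : Int) :
    (dict8 a b c d e f g h).modify "proteins" 0 (· + q) = dict8 a (b + q) c d e f g h := by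
  simp [dict8, PySem.Dict.modify, PySem.Dict.insert, PySem.Dict.contains, PySem.Dict.getD, PySem.Dict.get?]

lemma mod_vegetables (a b c d e f g h q : Int) :
    (dict8 a b c d e f g h).modify "vegetables" 0 (· + q) = dict8 a b (c + q) d e f g h := by
  simp [dict8, PySem.Dict.modify, PySem.Dict.insert, PySem.Dict.contains, PySem.Dict.getD, PySem.Dict.get?]

lemma mod_fruits (a b c d e f g h q : Int) :
    (dict8 a b c d e f g h).modify "fruits" 0 (· + q) = dict8 a b c (d + q) e f g h := by
  simp [dict8, PySem.Dict.modify, PySem.Dict.insert, PySem.Dict.contains, PySem.Dict.getD, PySem.Dict.get?]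

lemma mod_dairy (a b c d e f g h q : Int) :
    (dict8 a b c d e f g h).modify "dairy" 0 (· + q) = dict8 a b c d (e + q) f g h := by
  simp [dict8, PySem.Dict.modify, PySem.Dict.insert, PySem.Dict.contains, PySem.Dict.getD, PySem.Dict.get?]

lemma mod_snacks (a b c d e f g h q : Int) :
    (dict8 a b c d e f g h).modify "snacks" 0 (· + q) = dict8 a b c d e (f + q) g h := by
  simp [dict8, PySem.Dict.modify, PySem.Dict.insert, PySem.Dict.contains, PySem.Dict.getD, PySem.Dict.get?]

lemma mod_beverages (a b c d e f g h q : Int) :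
    (dict8 a b c d e f g h).modify "beverages" 0 (· + q) = dict8 a b c d e f (g + q) h := by
  simp [dict8, PySem.Dict.modify, PySem.Dict.insert, PySem.Dict.contains, PySem.Dict.getD, PySem.Dict.get?]

lemma mod_other (a b c d e f g h q : Int) :
    (dict8 a b c d e f g h).modify "other" 0 (· + q) = dict8 a b c d e f g (h + q) := by
  simp [dict8, PySem.Dict.modify, PySem.Dict.insert, PySem.Dict.contains, PySem.Dict.getD, PySem.Dict.get?]

lemma foldA_dict8 (xs : List (String × Int)) (a b c d e f g h : Int) :
    xs.foldl stepA (dict8 a b c d e f g h) =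
      dict8 (a + catSum "grains" xs) (b + catSum "proteins" xs) (c + catSum "vegetables" xs)
            (d + catSum "fruits" xs) (e + catSum "dairy" xs) (f + catSum "snacks" xs)
            (g + catSum "beverages" xs) (h + catSum "other" xs) := by
  induction xs generalizing a b c d e f g h with
  | nil => simp [catSum]
  | cons p xs ih =>
      rcases classify_cases p.1 with hc | hc | hc | hc | hc | hc | hc | hc <;>
      · first
        | rw [List.foldl_cons, stepA_eq, hc, mod_grains, ih]
        | rw [List.foldl_cons, stepA_eq, hc, mod_proteins, ih]
        | rw [List.foldl_cons, stepA_eq, hc, mod_vegetables, ih]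
        | rw [List.foldl_cons, stepA_eq, hc, mod_fruits, ih]
        | rw [List.foldl_cons, stepA_eq, hc, mod_dairy, ih]
        | rw [List.foldl_cons, stepA_eq, hc, mod_snacks, ih]
        | rw [List.foldl_cons, stepA_eq, hc, mod_beverages, ih]
        | rw [List.foldl_cons, stepA_eq, hc, mod_other, ih]
        simp [dict8, catSum_cons, hc, add_assoc]

-- ===== VERDICT (by name: the statement is the Claim_ definition above) =====
theorem categorize_food_preferences_py_spec : Claim_equal_categorize_food_preferences_py := by
  intro xs _
  show categorize_food_preferences_py xs = categorize_food_preferences_py_alt xs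
  unfold categorize_food_preferences_py categorize_food_preferences_py_alt
  rw [show (PySem.Dict.mk [("grains", (0:Int)), ("proteins", 0), ("vegetables", 0), ("fruits", 0),
        ("dairy", 0), ("snacks", 0), ("beverages", 0), ("other", 0)]) = dict8 0 0 0 0 0 0 0 0 from rfl]
  rw [foldA_dict8]
  simp [dict8, catTable, catSum]
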